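-- pv_equiv track=rewrite | github.com/nilaymaj/pyraminx-solver | pUtils.py | modifyAlgoForOrientation
-- ===== SOURCE A (Python) =====
-- def modifyAlgoForOrientation(algo, numOfRots):
--   if numOfRots%3 == 0:
--     return algo
--
--   clockwiseSwitcher = {
--     "U":"U", "U'":"U'",
--     "F":"R", "F'":"R'",
--     "R":"L", "R'":"L'",
--     "L":"F", "L'":"F'"
--   }
--   anticlockwiseSwitcher = {
--     "U": "U", "U'": "U'",
--     "F": "L", "F'": "L'",
--     "R": "F", "R'": "F'",
--     "L": "R", "L'": "R'"
--   }
--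
--   if numOfRots%3 == 1:
--     for i in range(len(algo)):
--       algo[i] = clockwiseSwitcher[algo[i]]
--   elif numOfRots%3 == 2:
--     for i in range(len(algo)):
--       algo[i] = anticlockwiseSwitcher[algo[i]]
--   return algo
-- ===== SOURCE B (Python) =====
-- def modifyAlgoForOrientation(algo, numOfRots):
--   # Apply a single 120-degree clockwise relabelling pass numOfRots % 3 times,
--   # translating character by character (U and ' pass through).
--   rot = {"F": "R", "R": "L", "L": "F"}
--   for _ in range(numOfRots % 3):
--     algo[:] = ["".join(rot.get(c, c) for c in m) for m in algo]
--   return algo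
-- ===== Notes on version B (the rewrite author's own statement) =====
-- stated objective: alternative
-- what changed: Replaces the direction-branched whole-token dictionary remap with repeated application of a single one-step clockwise relabelling, done character-by-character (F->R->L->F, everything else fixed) numOfRots % 3 times.
import Mathlib
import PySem

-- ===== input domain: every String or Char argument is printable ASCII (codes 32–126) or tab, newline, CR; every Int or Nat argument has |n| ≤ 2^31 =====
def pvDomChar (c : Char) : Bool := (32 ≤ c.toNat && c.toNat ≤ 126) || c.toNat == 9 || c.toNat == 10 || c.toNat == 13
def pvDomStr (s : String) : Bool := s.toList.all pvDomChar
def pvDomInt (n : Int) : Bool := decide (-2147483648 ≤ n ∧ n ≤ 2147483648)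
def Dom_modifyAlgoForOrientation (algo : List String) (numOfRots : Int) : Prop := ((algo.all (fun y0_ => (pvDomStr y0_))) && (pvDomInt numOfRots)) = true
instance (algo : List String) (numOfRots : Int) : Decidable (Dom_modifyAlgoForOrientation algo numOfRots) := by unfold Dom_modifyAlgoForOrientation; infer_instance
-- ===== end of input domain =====

-- B applies a one-step clockwise relabelling numOfRots % 3 times instead of A's direction-branched
-- whole-token dict remap; like A, the Python B mutates the list in place (equivalence is about the return value).

-- ===== PORT A =====
-- the two dict literals of A
def pvClockwiseSwitcher : PySem.Dict String String :=
  PySem.Dict.ofList [("U","U"), ("U'","U'"), ("F","R"), ("F'","R'"),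
                     ("R","L"), ("R'","L'"), ("L","F"), ("L'","F'")]
def pvAnticlockwiseSwitcher : PySem.Dict String String :=
  PySem.Dict.ofList [("U","U"), ("U'","U'"), ("F","L"), ("F'","L'"),
                     ("R","F"), ("R'","F'"), ("L","R"), ("L'","R'")]

-- the index loop `for i in range(len(algo)): algo[i] = switcher[algo[i]]` as a map;
-- the dict lookup raises KeyError on unknown moves (excluded by Pre_), `.getD ""` stands for that
def modifyAlgoForOrientation (algo : List String) (numOfRots : Int) : List String :=
  if PySem.Int.mod numOfRots 3 = 0 then algo
  else if PySem.Int.mod numOfRots 3 = 1 then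
    algo.map (fun m => (PySem.Dict.get? pvClockwiseSwitcher m).getD "")
  else if PySem.Int.mod numOfRots 3 = 2 then
    algo.map (fun m => (PySem.Dict.get? pvAnticlockwiseSwitcher m).getD "")
  else algo

-- ===== PORT B =====
def pvRot : PySem.Dict String String := PySem.Dict.ofList [("F","R"), ("R","L"), ("L","F")]

-- `"".join(rot.get(c, c) for c in m)`
def pvRotTok (m : String) : String :=
  String.ofList
    ((m.toList.map (fun c => ((PySem.Dict.get? pvRot (String.ofList [c])).getD (String.ofList [c])).toList)).flatten)

-- `for _ in range(numOfRots % 3): algo[:] = [...]`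
def modifyAlgoForOrientation_alt (algo : List String) (numOfRots : Int) : List String :=
  (PySem.List.pyRange 0 (PySem.Int.mod numOfRots 3) 1).foldl (fun acc _ => acc.map pvRotTok) algo

-- ===== PRECONDITION & SPEC =====
-- Pre_ excludes exactly the inputs on which A raises KeyError: a rotation that actually remaps
-- (numOfRots % 3 ≠ 0) together with a token outside the eight legal moves.
def Pre_modifyAlgoForOrientation (algo : List String) (numOfRots : Int) : Prop :=
  PySem.Int.mod numOfRots 3 = 0 ∨
    ∀ m ∈ algo, m ∈ (["U", "U'", "F", "F'", "R", "R'", "L", "L'"] : List String)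
instance (algo : List String) (numOfRots : Int) : Decidable (Pre_modifyAlgoForOrientation algo numOfRots) := by
  unfold Pre_modifyAlgoForOrientation; infer_instance

def pvWitness_modifyAlgoForOrientation : List String × Int := (["F", "U'", "L'", "R"], 2)

def Spec_modifyAlgoForOrientation (algo : List String) (numOfRots : Int) (out : List String) : Prop := out = modifyAlgoForOrientation_alt algo numOfRots
instance (algo : List String) (numOfRots : Int) (out : List String) : Decidable (Spec_modifyAlgoForOrientation algo numOfRots out) := by unfold Spec_modifyAlgoForOrientation; infer_instance

-- ===== CLAIM (what is proved, stated in full; the proofs are below) =====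
def Claim_equal_modifyAlgoForOrientation : Prop := ∀ (algo : List String) (numOfRots : Int), Dom_modifyAlgoForOrientation algo numOfRots → Pre_modifyAlgoForOrientation algo numOfRots → Spec_modifyAlgoForOrientation algo numOfRots (modifyAlgoForOrientation algo numOfRots)

-- ===== LEMMAS AND PROOFS =====
lemma pvMod3_cases (n : Int) :
    PySem.Int.mod n 3 = 0 ∨ PySem.Int.mod n 3 = 1 ∨ PySem.Int.mod n 3 = 2 := by
  rw [PySem.Int.mod_eq_emod_of_pos (by omega)]
  omega

lemma pvRotTok_cw (m : String)
    (hm : m ∈ (["U", "U'", "F", "F'", "R", "R'", "L", "L'"] : List String)) :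
    (PySem.Dict.get? pvClockwiseSwitcher m).getD "" = pvRotTok m := by
  fin_cases hm <;> decide

lemma pvRotTok_acw (m : String)
    (hm : m ∈ (["U", "U'", "F", "F'", "R", "R'", "L", "L'"] : List String)) :
    (PySem.Dict.get? pvAnticlockwiseSwitcher m).getD "" = pvRotTok (pvRotTok m) := by
  fin_cases hm <;> decide

-- ===== VERDICT (by name: the statement is the Claim_ definition above) =====
theorem modifyAlgoForOrientation_spec : Claim_equal_modifyAlgoForOrientation := by
  intro algo numOfRots _ hpre
  unfold Spec_modifyAlgoForOrientation modifyAlgoForOrientation modifyAlgoForOrientation_alt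
  rcases pvMod3_cases numOfRots with h | h | h <;> rw [h]
  · simp [PySem.List.pyRange_one_eq_nil]
  · have hall : ∀ m ∈ algo, m ∈ (["U", "U'", "F", "F'", "R", "R'", "L", "L'"] : List String) := by
      rcases hpre with h0 | hall
      · rw [h0] at h; exact absurd h (by decide)
      · exact hall
    have : PySem.List.pyRange 0 1 1 = [(0 : Int)] := by decide
    simp only [if_neg (by decide : ¬ (1:Int) = 0), this, List.foldl]
    exact List.map_congr_left fun m hm => pvRotTok_cw m (hall m hm)
  · have hall : ∀ m ∈ algo, m ∈ (["U", "U'", "F", "F'", "R", "R'", "L", "L'"] : List String) := by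
      rcases hpre with h0 | hall
      · rw [h0] at h; exact absurd h (by decide)
      · exact hall
    have : PySem.List.pyRange 0 2 1 = [(0 : Int), 1] := by decide
    simp only [if_neg (by decide : ¬ (2:Int) = 0), if_neg (by decide : ¬ (2:Int) = 1), this, List.foldl, List.map_map]
    exact List.map_congr_left fun m hm => pvRotTok_acw m (hall m hm)
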